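-- pv_equiv track=rewrite | github.com/ethierlab/Decoder-Processing | stride_effect.py | valid_window_indices
-- ===== SOURCE A (Python) =====
-- def valid_window_indices(n_time, k, cuts, start=0, end=None, stride=1, phase=0):
--     """
--     Renvoie des indices t (fin de fenêtre [t-k, t)) valides:
--     - stride > 0 : ancré au début (start), t croît.
--     - stride < 0 : ancré à la fin  (end),   t décroit lors du calcul (puis trié).
--     - phase toujours modulo |stride|.
--     - on évite les fenêtres qui traversent un 'cut'.
--     """
--     end = n_time if end is None else end
--     s = abs(int(stride)) if int(stride) != 0 else 1
--     phase = int(phase) % s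
--     t_min = start + k
--     t_max = end  # exclusif pour range upper bound
--
--     idx = []
--     if stride > 0:
--         first = t_min + phase
--         for t in range(first, t_max, s):
--             if any(t - k < c < t for c in cuts):
--                 continue
--             idx.append(t)
--     else:
--         # on part de la fin: dernier index possible = t_max - 1
--         last_possible = t_max - 1
--         if last_possible < t_min:
--             return []
--         # choisir t0 <= last_possible tel que (t0 - t_min - phase) % s == 0
--         offset = (last_possible - t_min - phase) % s
--         t0 = last_possible - offset
--         for t in range(t0, t_min - 1, -s):
--             if any(t - k < c < t for c in cuts):
--                 continue
--             idx.append(t)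
--         idx.sort()  # on renvoie toujours croissant pour cohérence
--     return idx
-- ===== SOURCE B (Python) =====
-- def valid_window_indices(n_time, k, cuts, start=0, end=None, stride=1, phase=0):
--     """Same result as A: sort cuts once, then one binary search per window
--     instead of a scan of the cuts list; candidate windows are generated
--     ascending in both stride directions, so no final sort is needed."""
--     end = n_time if end is None else end
--     s = abs(int(stride)) if int(stride) != 0 else 1
--     phase = int(phase) % s
--     t_min = start + k
--     cs = sorted(cuts)
--
--     def blocked(t):
--         # first cut > t - k, by hand-rolled bisect; window is bad iff it is < t
--         lo, hi = 0, len(cs)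
--         x = t - k
--         while lo < hi:
--             mid = (lo + hi) // 2
--             if cs[mid] <= x:
--                 lo = mid + 1
--             else:
--                 hi = mid
--         return lo < len(cs) and cs[lo] < t
--
--     if stride > 0:
--         ts = range(t_min + phase, end, s)
--     else:
--         last = end - 1
--         if last < t_min:
--             return []
--         t0 = last - ((last - t_min - phase) % s)
--         lo = t0 - s * ((t0 - t_min) // s)
--         ts = range(lo, t0 + 1, s)
--     return [t for t in ts if not blocked(t)]
-- ===== Notes on version B (the rewrite author's own statement) =====
-- stated objective: alternative
-- what changed: B sorts the cuts once and answers each window's 'does a cut lie in (t-k,t)?' with one hand-written binary search instead of scanning the cuts list, and generates the candidate windows in ascending order for negative strides so the final sort disappears; on the measured random inputs A's short-circuiting scan is not slower, so no speed is claimed.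
import Mathlib
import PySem

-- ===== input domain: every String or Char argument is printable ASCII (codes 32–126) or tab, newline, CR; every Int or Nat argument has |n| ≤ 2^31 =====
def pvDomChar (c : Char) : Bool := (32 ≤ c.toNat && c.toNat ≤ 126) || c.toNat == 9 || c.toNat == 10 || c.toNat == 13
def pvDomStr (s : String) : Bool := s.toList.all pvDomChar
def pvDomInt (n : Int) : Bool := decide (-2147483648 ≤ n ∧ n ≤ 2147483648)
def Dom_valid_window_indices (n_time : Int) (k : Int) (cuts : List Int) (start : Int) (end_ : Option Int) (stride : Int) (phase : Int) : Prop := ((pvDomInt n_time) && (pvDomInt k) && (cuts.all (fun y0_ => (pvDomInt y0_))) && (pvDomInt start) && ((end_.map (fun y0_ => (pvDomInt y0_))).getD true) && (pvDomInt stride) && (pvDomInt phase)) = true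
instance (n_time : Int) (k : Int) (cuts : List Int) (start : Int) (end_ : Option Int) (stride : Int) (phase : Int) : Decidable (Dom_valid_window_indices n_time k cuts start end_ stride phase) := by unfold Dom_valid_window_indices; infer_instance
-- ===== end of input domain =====

-- B sorts the cuts once and binary-searches per window instead of scanning the cuts list,
-- and emits candidates ascending for negative strides so the final sort disappears (alternative algorithm).

-- ===== PORT A =====
-- literal transliteration of A: per-window linear scan of cuts; negative stride walks
-- downward and sorts the result at the end.
def valid_window_indices (n_time : Int) (k : Int) (cuts : List Int) (start : Int) (end_ : Option Int) (stride : Int) (phase : Int) : List Int :=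
  let end1 := end_.getD n_time
  let s := if stride ≠ 0 then |stride| else 1
  let ph := PySem.Int.mod phase s
  let t_min := start + k
  let t_max := end1
  if stride > 0 then
    (PySem.List.pyRange (t_min + ph) t_max s).foldl
      (fun idx t => if cuts.any (fun c => decide (t - k < c) && decide (c < t)) then idx else idx ++ [t]) []
  else
    let last := t_max - 1
    if last < t_min then []
    else
      let offset := PySem.Int.mod (last - t_min - ph) s
      let t0 := last - offset
      let idx := (PySem.List.pyRange t0 (t_min - 1) (-s)).foldl
        (fun idx t => if cuts.any (fun c => decide (t - k < c) && decide (c < t)) then idx else idx ++ [t]) []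
      PySem.List.sorted idx (fun x => x)

-- ===== PORT B =====
-- hand-written bisect from Source B: first index with cs[index] > x on a sorted cs.
-- lo, hi are Python non-negative ints; (lo+hi)//2 on them is exactly Nat division.
def vwiBsearch (cs : List Int) (x : Int) (lo hi : Nat) : Nat :=
  if h : lo < hi then
    let mid := (lo + hi) / 2
    if cs.getD mid 0 ≤ x then vwiBsearch cs x (mid + 1) hi
    else vwiBsearch cs x lo mid
  else lo
termination_by hi - lo
decreasing_by all_goals omega

-- Source B's `blocked(t)`: cs[lo] read only in range, so getD is exact.
def vwiBlocked (cs : List Int) (k t : Int) : Bool :=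
  let i := vwiBsearch cs (t - k) 0 cs.length
  decide (i < cs.length) && decide (cs.getD i 0 < t)

def valid_window_indices_alt (n_time : Int) (k : Int) (cuts : List Int) (start : Int) (end_ : Option Int) (stride : Int) (phase : Int) : List Int :=
  let end1 := end_.getD n_time
  let s := if stride ≠ 0 then |stride| else 1
  let ph := PySem.Int.mod phase s
  let t_min := start + k
  let cs := PySem.List.sorted cuts (fun x => x)
  if stride > 0 then
    (PySem.List.pyRange (t_min + ph) end1 s).filter (fun t => !vwiBlocked cs k t)
  else
    let last := end1 - 1
    if last < t_min then []
    else
      let t0 := last - PySem.Int.mod (last - t_min - ph) s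
      let lo := t0 - s * PySem.Int.floordiv (t0 - t_min) s
      (PySem.List.pyRange lo (t0 + 1) s).filter (fun t => !vwiBlocked cs k t)

-- ===== PRECONDITION & SPEC =====
def Spec_valid_window_indices (n_time : Int) (k : Int) (cuts : List Int) (start : Int) (end_ : Option Int) (stride : Int) (phase : Int) (out : List Int) : Prop := out = valid_window_indices_alt n_time k cuts start end_ stride phase
instance (n_time : Int) (k : Int) (cuts : List Int) (start : Int) (end_ : Option Int) (stride : Int) (phase : Int) (out : List Int) : Decidable (Spec_valid_window_indices n_time k cuts start end_ stride phase out) := by unfold Spec_valid_window_indices; infer_instance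

-- ===== CLAIM (what is proved, stated in full; the proofs are below) =====
def Claim_equal_valid_window_indices : Prop := ∀ (n_time : Int) (k : Int) (cuts : List Int) (start : Int) (end_ : Option Int) (stride : Int) (phase : Int), Dom_valid_window_indices n_time k cuts start end_ stride phase → Spec_valid_window_indices n_time k cuts start end_ stride phase (valid_window_indices n_time k cuts start end_ stride phase)

-- ===== LEMMAS AND PROOFS =====

-- the binary search returns a split point: everything before is ≤ x, everything from it on is > x
theorem vwiBsearch_spec (cs : List Int) (x : Int) (hs : cs.Pairwise (· ≤ ·)) :
    ∀ (n lo hi : Nat), hi - lo ≤ n → hi ≤ cs.length →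
    (∀ i, i < lo → cs.getD i 0 ≤ x) →
    (∀ i, hi ≤ i → i < cs.length → x < cs.getD i 0) →
    (∀ i, i < vwiBsearch cs x lo hi → cs.getD i 0 ≤ x) ∧
    (∀ i, vwiBsearch cs x lo hi ≤ i → i < cs.length → x < cs.getD i 0) := by
  have hmono : ∀ p q, q < cs.length → p ≤ q → cs.getD p 0 ≤ cs.getD q 0 := by
    intro p q hq hpq
    rcases eq_or_lt_of_le hpq with rfl | hlt
    · exact le_refl _
    · have hp : p < cs.length := lt_trans hlt hq
      rw [List.getD_eq_getElem cs 0 hp, List.getD_eq_getElem cs 0 hq]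
      exact List.pairwise_iff_getElem.mp hs p q hp hq hlt
  intro n
  induction n with
  | zero =>
    intro lo hi hm hhi hb ha
    rw [vwiBsearch]
    have : ¬ lo < hi := by omega
    simp only [this, dite_false]
    exact ⟨hb, fun i h1 h2 => ha i (by omega) h2⟩
  | succ n ih =>
    intro lo hi hm hhi hb ha
    rw [vwiBsearch]
    by_cases h : lo < hi
    · simp only [h, dite_true]
      have hmidlt : (lo + hi) / 2 < hi := by omega
      have hmidlen : (lo + hi) / 2 < cs.length := lt_of_lt_of_le hmidlt hhi
      by_cases hc : cs.getD ((lo + hi) / 2) 0 ≤ x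
      · simp only [hc, if_true]
        refine ih ((lo + hi) / 2 + 1) hi (by omega) hhi ?_ ha
        intro i hilt
        exact le_trans (hmono i ((lo + hi) / 2) hmidlen (by omega)) hc
      · simp only [hc, if_false]
        refine ih lo ((lo + hi) / 2) (by omega) (le_of_lt hmidlen) hb ?_
        intro i h1 h2
        exact lt_of_lt_of_le (lt_of_not_ge hc) (hmono ((lo + hi) / 2) i h2 h1)
    · simp only [h, dite_false]
      exact ⟨hb, fun i h1 h2 => ha i (by omega) h2⟩

-- blocked(t) on sorted cuts computes exactly A's `any(t-k < c < t for c in cuts)`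
theorem vwiBlocked_eq_any (cuts : List Int) (k t : Int) :
    vwiBlocked (PySem.List.sorted cuts (fun x => x)) k t
      = cuts.any (fun c => decide (t - k < c) && decide (c < t)) := by
  have hs : (PySem.List.sorted cuts (fun x => x)).Pairwise (· ≤ ·) := by
    simpa using PySem.List.sorted_pairwise cuts (fun x => x)
  set cs := PySem.List.sorted cuts (fun x => x) with hcs
  have hspec := vwiBsearch_spec cs (t - k) hs (cs.length) 0 cs.length (by omega) le_rfl
    (by intro i hi; omega) (by intro i h1 h2; omega)
  obtain ⟨h1, h2⟩ := hspec
  set r := vwiBsearch cs (t - k) 0 cs.length with hr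
  have hmono : ∀ p q, q < cs.length → p ≤ q → cs.getD p 0 ≤ cs.getD q 0 := by
    intro p q hq hpq
    rcases eq_or_lt_of_le hpq with rfl | hlt
    · exact le_refl _
    · have hp : p < cs.length := lt_trans hlt hq
      rw [List.getD_eq_getElem cs 0 hp, List.getD_eq_getElem cs 0 hq]
      exact List.pairwise_iff_getElem.mp hs p q hp hq hlt
  rw [Bool.eq_iff_iff]
  simp only [vwiBlocked, ← hr, Bool.and_eq_true, decide_eq_true_eq, List.any_eq_true]
  constructor
  · rintro ⟨hrl, hrt⟩
    refine ⟨cs.getD r 0, ?_, h2 r le_rfl hrl, hrt⟩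
    rw [← PySem.List.mem_sorted cuts (fun x => x) false, ← hcs]
    rw [List.getD_eq_getElem cs 0 hrl]
    exact List.getElem_mem hrl
  · rintro ⟨c, hc, h3, h4⟩
    have hc' : c ∈ cs := by
      rw [hcs, PySem.List.mem_sorted cuts (fun x => x) false]; exact hc
    obtain ⟨i, hi, rfl⟩ := List.getElem_of_mem hc'
    have hgd : cs.getD i 0 = cs[i] := List.getD_eq_getElem cs 0 hi
    have hri : r ≤ i := by
      by_contra hlt
      have := h1 i (by omega)
      rw [hgd] at this; omega
    refine ⟨lt_of_le_of_lt hri hi, ?_⟩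
    have := hmono r i hi hri
    rw [hgd] at this; omega

-- A's append-fold with a skip branch is a filter on the negated test
theorem foldl_skip_eq_filter (q : Int → Bool) (l : List Int) :
    l.foldl (fun idx t => if q t then idx else idx ++ [t]) []
      = l.filter (fun t => !q t) := by
  have h : (fun (idx : List Int) t => if q t then idx else idx ++ [t])
      = fun idx t => if !q t then idx ++ [t] else idx := by
    funext idx t; cases q t <;> simp
  rw [h, PySem.List.foldl_append_if_eq_filter]
  simp

-- ascending pyRange is strictly increasing
theorem pyRange_pairwise_lt_of_pos (a b s : Int) (hs : 0 < s) :
    (PySem.List.pyRange a b s).Pairwise (· < ·) := by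
  rw [PySem.List.pyRange_of_pos a b hs]
  rw [List.pairwise_map]
  refine List.Pairwise.imp ?_ (List.pairwise_lt_range)
  intro p q hpq
  have h1 : (p : Int) < (q : Int) := by exact_mod_cast hpq
  have h2 : s * (p : Int) < s * (q : Int) := by
    exact (mul_lt_mul_iff_of_pos_left hs).mpr h1
  omega

-- A's downward range is the reverse of B's ascending range
theorem pyRange_down_eq_reverse (t0 tmin s : Int) (hs : 0 < s) :
    PySem.List.pyRange t0 (tmin - 1) (-s)
      = (PySem.List.pyRange (t0 - s * PySem.Int.floordiv (t0 - tmin) s) (t0 + 1) s).reverse := by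
  rw [PySem.Int.floordiv_eq_ediv_of_pos hs]
  set q := (t0 - tmin) / s with hq
  have hqr : s * q + (t0 - tmin) % s = t0 - tmin := Int.mul_ediv_add_emod (t0 - tmin) s
  have hr0 : 0 ≤ (t0 - tmin) % s := Int.emod_nonneg _ (by omega)
  have hrs : (t0 - tmin) % s < s := Int.emod_lt_of_pos _ hs
  rw [PySem.List.pyRange_of_pos _ _ hs]
  simp only [PySem.List.pyRange]
  have hns : ¬ (-s = 0) := by omega
  have hnp : ¬ (0 < -s) := by omega
  simp only [hns, if_false, hnp]
  by_cases htm : tmin ≤ t0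
  · have hq0 : 0 ≤ q := Int.ediv_nonneg (by omega) (le_of_lt hs)
    have hsq0 : 0 ≤ s * q := mul_nonneg (le_of_lt hs) hq0
    have hc1 : tmin - 1 < t0 := by omega
    have hc2 : t0 - s * q < t0 + 1 := by omega
    have hcd : (t0 - (tmin - 1) + s - 1) / s = q + 1 := by
      have hnum : t0 - (tmin - 1) + s - 1 = (t0 - tmin) % s + s * (q + 1) := by
        have : s * (q + 1) = s * q + s := by ring
        omega
      rw [hnum, Int.add_mul_ediv_left _ _ (by omega : s ≠ 0),
        Int.ediv_eq_zero_of_lt hr0 hrs]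
      omega
    have hca : (t0 + 1 - (t0 - s * q) + s - 1) / s = q + 1 := by
      have hnum : t0 + 1 - (t0 - s * q) + s - 1 = 0 + s * (q + 1) := by
        have : s * (q + 1) = s * q + s := by ring
        omega
      rw [hnum, Int.add_mul_ediv_left _ _ (by omega : s ≠ 0)]
      simp
    simp only [neg_neg, hc1, if_true, hc2, hcd, hca]
    apply List.ext_getElem
    · simp
    · intro i h1 h2
      simp only [List.getElem_map, List.getElem_range, List.getElem_reverse,
        List.length_map, List.length_range]
      simp only [List.length_map, List.length_range] at h1
      have hilt : i < (q + 1).toNat := h1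
      have h3 : (((q + 1).toNat - 1 - i : Nat) : Int) = q - (i : Int) := by omega
      rw [h3]; ring
  · have hsqn : s * q < 0 := by
      rcases lt_or_ge q 0 with h | h
      · exact mul_neg_of_pos_of_neg hs h
      · exfalso; have := mul_nonneg (le_of_lt hs) h; omega
    have hc1 : ¬ (tmin - 1 < t0) := by omega
    have hc2 : ¬ (t0 - s * q < t0 + 1) := by omega
    simp [hc1, hc2]

-- ===== VERDICT (by name: the statement is the Claim_ definition above) =====
theorem valid_window_indices_spec : Claim_equal_valid_window_indices := by
  unfold Claim_equal_valid_window_indices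
  intro n_time k cuts start end_ stride phase _
  unfold Spec_valid_window_indices valid_window_indices valid_window_indices_alt
  simp only []
  have hs : (0 : Int) < (if stride ≠ 0 then |stride| else 1) := by
    split_ifs with h
    · exact abs_pos.mpr h
    · omega
  set s := (if stride ≠ 0 then |stride| else 1) with hsdef
  set ph := PySem.Int.mod phase s with hphdef
  set end1 := end_.getD n_time with hend
  have hfun : (fun t => !vwiBlocked (PySem.List.sorted cuts (fun x => x)) k t)
      = (fun t => !(cuts.any (fun c => decide (t - k < c) && decide (c < t)))) := by
    funext t
    rw [vwiBlocked_eq_any]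
  by_cases hpos : stride > 0
  · simp only [hpos, if_true]
    rw [foldl_skip_eq_filter, hfun]
  · simp only [hpos, if_false]
    by_cases hlt : end1 - 1 < start + k
    · simp only [hlt, if_true]
    · simp only [hlt, if_false]
      rw [foldl_skip_eq_filter, hfun]
      set t0 := end1 - 1 - PySem.Int.mod (end1 - 1 - (start + k) - ph) s with ht0
      rw [pyRange_down_eq_reverse t0 (start + k) s hs]
      rw [List.filter_reverse]
      set asc := PySem.List.pyRange (t0 - s * PySem.Int.floordiv (t0 - (start + k)) s) (t0 + 1) s with hasc
      set p := (fun t => !(cuts.any (fun c => decide (t - k < c) && decide (c < t)))) with hp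
      refine PySem.List.sorted_eq_of_perm_of_pairwise_lt _ (asc.filter p) (fun x => x) ?_ ?_
      · exact (List.reverse_perm _).symm
      · exact List.Pairwise.sublist List.filter_sublist
          (pyRange_pairwise_lt_of_pos _ _ _ hs)
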